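-- pv_equiv track=rewrite | github.com/joshanashakya/dissertation | workspace/dataset/java-python/GeeksForGeeks/3354/A/2.py | maxNormalSubstring
-- ===== SOURCE A (Python) =====
-- def maxNormalSubstring(P, Q, K, N):
--
--     if (K == 0):
--         return 0
--
--     # keeps count of normal characters
--     count = 0
--
--     # indexes of substring
--     left, right = 0, 0
--
--     # maintain length of longest substring
--     # with at most K normal characters
--     ans = 0
--
--     while (right < N):
--
--         while (right < N and count <= K):
--
--             # get position of character
--             pos = ord(P[right]) - ord('a')
--
--             # check if current character is normal
--             if (Q[pos] == '0'):
--
--                 # check if normal characters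
--                 # count exceeds K
--                 if (count + 1 > K):
--                     break
--                 else:
--                     count += 1
--
--             right += 1
--
--             # update answer with substring length
--             if (count <= K):
--                 ans = max(ans, right - left)
--
--         while (left < right):
--
--             # get position of character
--             pos = ord(P[left]) - ord('a')
--
--             left += 1
--
--             # check if character is
--             # normal then decrement count
--             if (Q[pos] == '0'):
--                 count -= 1
--
--             if (count < K):
--                 break
--
--     return ans
-- ===== SOURCE B (Python) =====
-- def maxNormalSubstring(P, Q, K, N):
--     # Prefix-sum + binary-search reformulation: table of normal-char counts,
--     # then for each right endpoint binary-search the leftmost feasible start.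
--     if K == 0:
--         return 0
--     normal = [1 if Q[ord(P[i]) - ord('a')] == '0' else 0 for i in range(N)]
--     pre = [0]
--     for x in normal:
--         pre.append(pre[-1] + x)
--     ans = 0
--     for right in range(1, N + 1):
--         lo, hi = 0, right
--         while lo < hi:
--             mid = (lo + hi) // 2
--             if pre[right] - pre[mid] <= K:
--                 hi = mid
--             else:
--                 lo = mid + 1
--         ans = max(ans, right - lo)
--     return ans
-- ===== Notes on version B (the rewrite author's own statement) =====
-- stated objective: alternative
-- what changed: Replaces the two-pointer sliding window (nested whiles with breaks and a running count) by a prefix-sum table of normal-character counts plus, for each right endpoint, a binary search for the leftmost feasible window start.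
import Mathlib
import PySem

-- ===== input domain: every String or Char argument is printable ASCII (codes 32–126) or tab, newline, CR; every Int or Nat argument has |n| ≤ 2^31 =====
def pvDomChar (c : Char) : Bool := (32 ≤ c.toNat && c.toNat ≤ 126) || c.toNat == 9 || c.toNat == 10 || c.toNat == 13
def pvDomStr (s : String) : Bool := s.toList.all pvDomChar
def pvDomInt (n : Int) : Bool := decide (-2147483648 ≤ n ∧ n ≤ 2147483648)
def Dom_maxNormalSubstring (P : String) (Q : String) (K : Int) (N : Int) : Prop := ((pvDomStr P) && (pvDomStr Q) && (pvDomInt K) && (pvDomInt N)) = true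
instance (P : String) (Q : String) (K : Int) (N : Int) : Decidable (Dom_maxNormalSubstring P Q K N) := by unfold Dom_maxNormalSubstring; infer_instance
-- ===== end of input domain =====

-- B replaces A's two-pointer sliding window by a prefix-sum table plus a binary
-- search for the leftmost feasible start of each window (alternative algorithm,
-- similar cost); return values agree on all inputs where the Python A returns.

-- ===== PORT A =====
-- Inner while `right < N and count <= K` loop of A; state (count, left, right, ans).
-- Fuel only makes the recursion total; on Pre_ inputs it never runs out.
-- Where Python would raise IndexError, `getD` supplies a dummy (outside Pre_ only).
def aInner1 (P Q : List Char) (K N : Int) : Nat → Int × Int × Int × Int → Int × Int × Int × Int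
  | 0, st => st
  | fuel+1, (count, left, right, ans) =>
    if right < N ∧ count ≤ K then
      let pos : Int := (((PySem.List.pyGet? P right).getD ' ').toNat : Int) - 97
      if (PySem.List.pyGet? Q pos).getD ' ' == '0' then
        if count + 1 > K then (count, left, right, ans)
        else
          let count' := count + 1
          let right' := right + 1
          let ans' := if count' ≤ K then max ans (right' - left) else ans
          aInner1 P Q K N fuel (count', left, right', ans')
      else
        let right' := right + 1
        let ans' := if count ≤ K then max ans (right' - left) else ans
        aInner1 P Q K N fuel (count, left, right', ans')
    else (count, left, right, ans)

-- Inner while `left < right` loop of A.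
def aInner2 (P Q : List Char) (K : Int) : Nat → Int × Int × Int × Int → Int × Int × Int × Int
  | 0, st => st
  | fuel+1, (count, left, right, ans) =>
    if left < right then
      let pos : Int := (((PySem.List.pyGet? P left).getD ' ').toNat : Int) - 97
      let left' := left + 1
      let count' := if (PySem.List.pyGet? Q pos).getD ' ' == '0' then count - 1 else count
      if count' < K then (count', left', right, ans)
      else aInner2 P Q K fuel (count', left', right, ans)
    else (count, left, right, ans)

-- Outer while `right < N` loop of A.
def aOuter (P Q : List Char) (K N : Int) : Nat → Int × Int × Int × Int → Int × Int × Int × Int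
  | 0, st => st
  | fuel+1, st =>
    if st.2.2.1 < N then
      aOuter P Q K N fuel (aInner2 P Q K (N.toNat + 1) (aInner1 P Q K N (N.toNat + 1) st))
    else st

def maxNormalSubstring (P : String) (Q : String) (K : Int) (N : Int) : Int :=
  if K == 0 then 0
  else (aOuter P.toList Q.toList K N (N.toNat + 1) (0, 0, 0, 0)).2.2.2

-- ===== PORT B =====
-- `[1 if Q[ord(P[i]) - ord('a')] == '0' else 0 for i in range(N)]`
def bNormal (P Q : List Char) (N : Int) : List Int :=
  (PySem.List.pyRange 0 N 1).map (fun i =>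
    if (PySem.List.pyGet? Q ((((PySem.List.pyGet? P i).getD ' ').toNat : Int) - 97)).getD ' ' == '0'
    then (1 : Int) else 0)

-- `pre = [0]; for x in normal: pre.append(pre[-1] + x)`
def bPre (normal : List Int) : List Int :=
  normal.foldl (fun acc x => acc ++ [(PySem.List.pyGet? acc (-1)).getD 0 + x]) [0]

-- `while lo < hi: mid = (lo+hi)//2; …` — fuel only makes the loop total.
def bSearch (pre : List Int) (K : Int) (right : Int) : Nat → Int → Int → Int
  | 0, lo, _ => lo
  | fuel+1, lo, hi =>
    if lo < hi then
      let mid := PySem.Int.floordiv (lo + hi) 2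
      if (PySem.List.pyGet? pre right).getD 0 - (PySem.List.pyGet? pre mid).getD 0 ≤ K then
        bSearch pre K right fuel lo mid
      else bSearch pre K right fuel (mid + 1) hi
    else lo

def maxNormalSubstring_alt (P : String) (Q : String) (K : Int) (N : Int) : Int :=
  if K == 0 then 0
  else
    let pre := bPre (bNormal P.toList Q.toList N)
    (PySem.List.pyRange 1 (N + 1) 1).foldl
      (fun ans right => max ans (right - bSearch pre K right (N.toNat + 2) 0 right)) 0

-- ===== PRECONDITION & SPEC =====
-- Pre_ holds exactly where the Python A returns: A raises IndexError when some
-- scanned character yields an out-of-range index into Q or when N > len(P), and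
-- it loops forever when K < 0 with N ≥ 1; those inputs are excluded.
def Pre_maxNormalSubstring (P : String) (Q : String) (K : Int) (N : Int) : Prop :=
  K = 0 ∨ N ≤ 0 ∨
    (1 ≤ K ∧ N ≤ (P.toList.length : Int) ∧
      ∀ i : Nat, i < N.toNat →
        (PySem.List.pyGet? Q.toList ((P.toList[i]!.toNat : Int) - 97)).isSome = true)
instance (P : String) (Q : String) (K : Int) (N : Int) : Decidable (Pre_maxNormalSubstring P Q K N) := by
  unfold Pre_maxNormalSubstring; infer_instance
def pvWitness_maxNormalSubstring : String × String × Int × Int := ("ab", "01", 1, 2)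

def Spec_maxNormalSubstring (P : String) (Q : String) (K : Int) (N : Int) (out : Int) : Prop := out = maxNormalSubstring_alt P Q K N
instance (P : String) (Q : String) (K : Int) (N : Int) (out : Int) : Decidable (Spec_maxNormalSubstring P Q K N out) := by unfold Spec_maxNormalSubstring; infer_instance

-- ===== CLAIM (what is proved, stated in full; the proofs are below) =====
def Claim_equal_maxNormalSubstring : Prop := ∀ (P : String) (Q : String) (K : Int) (N : Int), Dom_maxNormalSubstring P Q K N → Pre_maxNormalSubstring P Q K N → Spec_maxNormalSubstring P Q K N (maxNormalSubstring P Q K N)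

-- ===== LEMMAS AND PROOFS =====

-- `true` iff position i of P holds a "normal" character, exactly as both ports test it.
def pvF (P Q : List Char) (i : Nat) : Bool :=
  (PySem.List.pyGet? Q ((((PySem.List.pyGet? P (i : Int)).getD ' ').toNat : Int) - 97)).getD ' ' == '0'

-- number of normal characters among positions [0, r)
def pvPre (P Q : List Char) (r : Nat) : Nat := (List.range r).countP (pvF P Q)

-- greatest r ≤ n with pvPre r ≤ b
def pvHb (P Q : List Char) (n b : Nat) : Nat := Nat.findGreatest (fun r => pvPre P Q r ≤ b) n

-- greatest right end ≤ n of a feasible window starting at l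
def pvH (P Q : List Char) (K' n l : Nat) : Nat := pvHb P Q n (pvPre P Q l + K')

-- least start l of a feasible window ending at r
def pvG (P Q : List Char) (K' r : Nat) : Nat :=
  Nat.find (⟨r, Nat.le_add_right _ _⟩ : ∃ l, pvPre P Q r ≤ pvPre P Q l + K')

def pvM (P Q : List Char) (K' n l : Nat) : Nat :=
  (Finset.Icc l n).sup (fun x => pvH P Q K' n x - x)

def pvV (P Q : List Char) (K' n : Nat) : Nat :=
  (Finset.Icc 0 n).sup (fun r => r - pvG P Q K' r)

theorem pvPre_zero (P Q : List Char) : pvPre P Q 0 = 0 := rfl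

theorem pvPre_succ (P Q : List Char) (r : Nat) :
    pvPre P Q (r + 1) = pvPre P Q r + (if pvF P Q r then 1 else 0) := by
  simp [pvPre, List.range_succ, List.countP_append, List.countP_cons]

theorem pvPre_mono (P Q : List Char) {l r : Nat} (h : l ≤ r) : pvPre P Q l ≤ pvPre P Q r := by
  induction r, h using Nat.le_induction with
  | base => exact le_refl _
  | succ m hm ih => rw [pvPre_succ]; omega

theorem pvPre_congr (P Q : List Char) {l m : Nat} (hlm : l ≤ m)
    (h : ∀ i, l ≤ i → i < m → pvF P Q i = false) : pvPre P Q m = pvPre P Q l := by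
  induction m, hlm using Nat.le_induction with
  | base => rfl
  | succ m hm ih =>
      rw [pvPre_succ, h m hm (by omega)]
      simp [ih (fun i h1 h2 => h i h1 (by omega))]

theorem pvHb_le (P Q : List Char) (n b : Nat) : pvHb P Q n b ≤ n := Nat.findGreatest_le n

theorem le_pvHb (P Q : List Char) {n b r : Nat} (hr : r ≤ n) (hp : pvPre P Q r ≤ b) :
    r ≤ pvHb P Q n b := Nat.le_findGreatest hr hp

theorem pvHb_spec (P Q : List Char) (n b : Nat) : pvPre P Q (pvHb P Q n b) ≤ b := by
  have := Nat.findGreatest_spec (P := fun r => pvPre P Q r ≤ b) (Nat.zero_le n)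
    (by simp [pvPre_zero])
  exact this

theorem pvH_le (P Q : List Char) (K' n l : Nat) : pvH P Q K' n l ≤ n := pvHb_le _ _ _ _

theorem pvH_spec (P Q : List Char) (K' n l : Nat) :
    pvPre P Q (pvH P Q K' n l) ≤ pvPre P Q l + K' := pvHb_spec _ _ _ _

theorem le_pvH (P Q : List Char) {K' n l r : Nat} (hr : r ≤ n)
    (hp : pvPre P Q r ≤ pvPre P Q l + K') : r ≤ pvH P Q K' n l := le_pvHb _ _ hr hp

theorem pvH_eq_of (P Q : List Char) {K' n l r : Nat} (hr : r ≤ n)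
    (h1 : pvPre P Q r ≤ pvPre P Q l + K')
    (h2 : r = n ∨ pvPre P Q l + K' < pvPre P Q (r + 1)) : pvH P Q K' n l = r := by
  refine le_antisymm ?_ (le_pvH P Q hr h1)
  rcases h2 with h2 | h2
  · subst h2; exact pvH_le _ _ _ _ _
  · by_contra hlt
    have h3 : r + 1 ≤ pvH P Q K' n l := by omega
    have := pvPre_mono P Q h3
    have := pvH_spec P Q K' n l
    omega

theorem pvH_lt_full (P Q : List Char) {K' n l : Nat} (h : pvH P Q K' n l < n) :
    pvPre P Q (pvH P Q K' n l) = pvPre P Q l + K' := by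
  have h1 := pvH_spec P Q K' n l
  have h2 : ¬ (pvPre P Q (pvH P Q K' n l + 1) ≤ pvPre P Q l + K') := by
    intro hc
    have h4 : pvH P Q K' n l + 1 ≤ n := by omega
    have := le_pvH P Q h4 hc
    omega
  have h3 := pvPre_succ P Q (pvH P Q K' n l)
  split at h3 <;> omega

theorem pvH_congr (P Q : List Char) {K' n l x : Nat} (h : pvPre P Q x = pvPre P Q l) :
    pvH P Q K' n x = pvH P Q K' n l := by
  unfold pvH; rw [h]

theorem pvG_le (P Q : List Char) (K' r : Nat) : pvG P Q K' r ≤ r :=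
  Nat.find_le (Nat.le_add_right _ _)

theorem pvG_spec (P Q : List Char) (K' r : Nat) :
    pvPre P Q r ≤ pvPre P Q (pvG P Q K' r) + K' :=
  Nat.find_spec (⟨r, Nat.le_add_right _ _⟩ : ∃ l, pvPre P Q r ≤ pvPre P Q l + K')

theorem pvG_min' (P Q : List Char) {K' r l : Nat} (h : pvPre P Q r ≤ pvPre P Q l + K') :
    pvG P Q K' r ≤ l := Nat.find_min' _ h

theorem pvG_eq (P Q : List Char) {K' r lo : Nat}
    (h1 : pvPre P Q r ≤ pvPre P Q lo + K')
    (h2 : ∀ l, l < lo → ¬ (pvPre P Q r ≤ pvPre P Q l + K')) : pvG P Q K' r = lo := by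
  refine le_antisymm (pvG_min' P Q h1) ?_
  by_contra hc
  exact h2 _ (by omega) (pvG_spec P Q K' r)

theorem pvV_eq_pvM (P Q : List Char) (K' n : Nat) : pvV P Q K' n = pvM P Q K' n 0 := by
  refine le_antisymm (Finset.sup_le ?_) (Finset.sup_le ?_)
  · intro r hr
    rw [Finset.mem_Icc] at hr
    refine le_trans ?_ (Finset.le_sup (f := fun x => pvH P Q K' n x - x)
      (Finset.mem_Icc.mpr ⟨Nat.zero_le _, le_trans (pvG_le P Q K' r) hr.2⟩))
    show r - pvG P Q K' r ≤ pvH P Q K' n (pvG P Q K' r) - pvG P Q K' r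
    have := le_pvH P Q (l := pvG P Q K' r) hr.2 (pvG_spec P Q K' r)
    omega
  · intro l hl
    rw [Finset.mem_Icc] at hl
    refine le_trans ?_ (Finset.le_sup (f := fun r => r - pvG P Q K' r)
      (Finset.mem_Icc.mpr ⟨Nat.zero_le _, pvH_le P Q K' n l⟩))
    show pvH P Q K' n l - l ≤ pvH P Q K' n l - pvG P Q K' (pvH P Q K' n l)
    have := pvG_min' P Q (pvH_spec P Q K' n l)
    omega

theorem exists_first_normal (P Q : List Char) {l r : Nat}
    (h : pvPre P Q l < pvPre P Q r) :
    ∃ j, l ≤ j ∧ j < r ∧ pvF P Q j = true ∧ ∀ i, l ≤ i → i < j → pvF P Q i = false := by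
  have hlr : l ≤ r := by
    by_contra hc
    have := pvPre_mono P Q (le_of_not_ge hc)
    omega
  have hex : ∃ i, l ≤ i ∧ i < r ∧ pvF P Q i = true := by
    by_contra hc
    push_neg at hc
    have : pvPre P Q r = pvPre P Q l := by
      refine pvPre_congr P Q hlr (fun i h1 h2 => ?_)
      rcases hb : pvF P Q i with _ | _
      · rfl
      · exact absurd hb (hc i h1 h2)
    omega
  obtain ⟨i0, hi0l, hi0r, hi0f⟩ := hex
  have hex' : ∃ i, l ≤ i ∧ pvF P Q i = true := ⟨i0, hi0l, hi0f⟩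
  refine ⟨Nat.find hex', (Nat.find_spec hex').1, ?_, (Nat.find_spec hex').2, ?_⟩
  · exact lt_of_le_of_lt (Nat.find_min' hex' ⟨hi0l, hi0f⟩) hi0r
  · intro i h1 h2
    have := Nat.find_min hex' h2
    rcases hb : pvF P Q i with _ | _
    · rfl
    · exact absurd ⟨h1, hb⟩ this

-- ===== B-side lemmas =====

theorem bNormal_eq (P Q : List Char) (N : Int) (n : Nat) (hN : N = (n : Int)) :
    bNormal P Q N = (List.range n).map (fun i => if pvF P Q i then (1 : Int) else 0) := by
  subst hN
  rw [bNormal, PySem.List.pyRange_one]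
  simp only [Int.sub_zero, Int.toNat_natCast, List.map_map]
  refine List.map_congr_left (fun k hk => ?_)
  simp only [Function.comp, pvF, Int.zero_add]
  rfl

theorem bPre_foldl (xs : List Int) : ∀ (a : List Int) (s : Int),
    List.foldl (fun acc x => acc ++ [(PySem.List.pyGet? acc (-1)).getD 0 + x]) (a ++ [s]) xs
      = a ++ List.scanl (· + ·) s xs := by
  induction xs with
  | nil => intro a s; simp
  | cons x xs ih =>
      intro a s
      rw [List.foldl_cons, List.scanl_cons]
      have h1 : (PySem.List.pyGet? (a ++ [s]) (-1)).getD 0 = s := by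
        rw [PySem.List.pyGet?_neg_one_append_singleton]; rfl
      rw [h1]
      have h2 : (a ++ [s]) ++ [s + x] = (a ++ [s]) ++ [s + x] := rfl
      calc List.foldl (fun acc x => acc ++ [(PySem.List.pyGet? acc (-1)).getD 0 + x])
              ((a ++ [s]) ++ [s + x]) xs
          = (a ++ [s]) ++ List.scanl (· + ·) (s + x) xs := ih (a ++ [s]) (s + x)
        _ = a ++ (s :: List.scanl (· + ·) (s + x) xs) := by simp

theorem scanl_pvPre (P Q : List Char) : ∀ (m j : Nat),
    List.scanl (· + ·) ((pvPre P Q j : Int))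
        ((List.range' j m).map (fun i => if pvF P Q i then (1 : Int) else 0))
      = (List.range' j (m + 1)).map (fun i => (pvPre P Q i : Int)) := by
  intro m
  induction m with
  | zero => intro j; simp
  | succ m ih =>
      intro j
      rw [List.range'_succ, List.map_cons, List.scanl_cons]
      have h2 : ((pvPre P Q j : Int) + (if pvF P Q j then (1 : Int) else 0))
          = (pvPre P Q (j + 1) : Int) := by
        rw [pvPre_succ]; split <;> push_cast <;> ring
      rw [h2, ih (j + 1)]
      rw [show m + 1 + 1 = (m + 1) + 1 from rfl, List.range'_succ (s := j), List.map_cons]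

theorem bPre_eq (P Q : List Char) (N : Int) (n : Nat) (hN : N = (n : Int)) :
    bPre (bNormal P Q N) = (List.range' 0 (n + 1)).map (fun i => (pvPre P Q i : Int)) := by
  rw [bNormal_eq P Q N n hN, bPre]
  have h0 : ([(0 : Int)] : List Int) = [] ++ [(0 : Int)] := rfl
  rw [h0, bPre_foldl]
  have hs := scanl_pvPre P Q n 0
  simp only [pvPre_zero, Nat.cast_zero] at hs
  rw [List.range_eq_range', hs]
  simp

theorem bPre_get (P Q : List Char) (N : Int) (n : Nat) (hN : N = (n : Int)) (i : Nat)
    (hi : i ≤ n) :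
    (PySem.List.pyGet? (bPre (bNormal P Q N)) (i : Int)).getD 0 = (pvPre P Q i : Int) := by
  rw [bPre_eq P Q N n hN, PySem.List.pyGet?_natCast]
  rw [List.getElem?_map]
  have : (List.range' 0 (n + 1))[i]? = some i := by
    rw [List.getElem?_range']
    · simp
    · omega
  rw [this]
  rfl

theorem bSearch_eq (P Q : List Char) (pl : List Int) (K : Int) (K' n : Nat)
    (hKc : K = (K' : Int))
    (hpl : ∀ i : Nat, i ≤ n → (PySem.List.pyGet? pl (i : Int)).getD 0 = (pvPre P Q i : Int))
    (r : Nat) (hr : r ≤ n) :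
    ∀ (fuel : Nat) (lo hi : Nat), lo ≤ hi → hi ≤ r →
      (∀ l, l < lo → ¬ (pvPre P Q r ≤ pvPre P Q l + K')) →
      pvPre P Q r ≤ pvPre P Q hi + K' → hi - lo < fuel →
      bSearch pl K (r : Int) fuel (lo : Int) (hi : Int) = (pvG P Q K' r : Int) := by
  intro fuel
  induction fuel with
  | zero => intro lo hi _ _ _ _ hf; omega
  | succ fuel ih =>
      intro lo hi hlohi hhir hmin hfeas hf
      by_cases hlh : lo = hi
      · subst hlh
        rw [bSearch, if_neg (by omega)]
        exact_mod_cast (pvG_eq P Q hfeas hmin).symm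
      · have hlt : lo < hi := by omega
        rw [bSearch, if_pos (by exact_mod_cast hlt)]
        have hmid : PySem.Int.floordiv ((lo : Int) + (hi : Int)) 2 = (((lo + hi) / 2 : Nat) : Int) := by
          rw [show ((lo : Int) + (hi : Int)) = ((lo + hi : Nat) : Int) by push_cast; ring]
          exact_mod_cast PySem.Int.floordiv_natCast (lo + hi) 2
        set m := (lo + hi) / 2 with hm
        have hm1 : lo ≤ m := by omega
        have hm2 : m < hi := by omega
        simp only [hmid, hpl r hr, hpl m (show m ≤ n by omega)]
        by_cases hcond : pvPre P Q r ≤ pvPre P Q m + K'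
        · rw [if_pos (by subst hKc; push_cast; omega)]
          exact ih lo m hm1 (by omega) hmin hcond (by omega)
        · rw [if_neg (by subst hKc; push_cast; omega)]
          have hmin' : ∀ l, l < m + 1 → ¬ (pvPre P Q r ≤ pvPre P Q l + K') := by
            intro l hl
            rcases Nat.lt_or_ge l lo with h | h
            · exact hmin l h
            · intro hc
              exact hcond (le_trans hc (by have := pvPre_mono P Q (show l ≤ m by omega); omega))
          exact ih (m + 1) hi (by omega) hhir hmin' hfeas (by omega)

theorem bFold (P Q : List Char) (pl : List Int) (K : Int) (K' n fl : Nat)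
    (hKc : K = (K' : Int)) (hfl : n + 2 ≤ fl)
    (hpl : ∀ i : Nat, i ≤ n → (PySem.List.pyGet? pl (i : Int)).getD 0 = (pvPre P Q i : Int)) :
    ∀ (m : Nat), m ≤ n →
      (PySem.List.pyRange 1 ((m : Int) + 1) 1).foldl
        (fun ans right => max ans (right - bSearch pl K right fl 0 right)) 0
      = ((pvV P Q K' m : Nat) : Int) := by
  intro m
  induction m with
  | zero =>
      intro _
      rw [PySem.List.pyRange_one_eq_nil (by omega)]
      simp [pvV]
  | succ m ih =>
      intro hm
      have hsplit : PySem.List.pyRange 1 (((m + 1 : Nat) : Int) + 1) 1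
          = PySem.List.pyRange 1 ((m : Int) + 1) 1 ++ [(m : Int) + 1] := by
        rw [show (((m + 1 : Nat) : Int) + 1) = ((m : Int) + 1) + 1 by push_cast; ring]
        exact PySem.List.pyRange_one_succ_right (by omega)
      rw [hsplit, List.foldl_append, ih (by omega)]
      simp only [List.foldl_cons, List.foldl_nil]
      have hb : bSearch pl K ((m : Int) + 1) fl 0 ((m : Int) + 1)
          = (pvG P Q K' (m + 1) : Int) := by
        have := bSearch_eq P Q pl K K' n hKc hpl (m + 1) hm fl 0 (m + 1)
          (by omega) (by omega) (by intro l hl; omega) (Nat.le_add_right _ _)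
          (by omega)
        rw [show ((m : Int) + 1) = ((m + 1 : Nat) : Int) by push_cast; ring]
        exact_mod_cast this
      rw [hb]
      have hIcc : Finset.Icc 0 (m + 1) = insert (m + 1) (Finset.Icc 0 m) := by
        ext x; simp [Finset.mem_Icc]; omega
      simp only [pvV]
      rw [hIcc, Finset.sup_insert]
      have hgle := pvG_le P Q K' (m + 1)
      push_cast [Nat.cast_max]
      rw [max_comm]
      congr 1
      omega

-- ===== A-side lemmas =====

theorem hfoldF (P Q : List Char) (i : Nat) :
    ((PySem.List.pyGet? Q ((((PySem.List.pyGet? P (i : Int)).getD ' ').toNat : Int) - 97)).getD ' ' == '0')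
      = pvF P Q i := rfl

theorem inner1_eq (P Q : List Char) (K' n : Nat) :
    ∀ (fuel : Nat) (l r : Nat) (a : Int), l ≤ r → r ≤ n →
      pvPre P Q r ≤ pvPre P Q l + K' → n - r < fuel →
      aInner1 P Q (K' : Int) (n : Int) fuel
          ((pvPre P Q r : Int) - (pvPre P Q l : Int), (l : Int), (r : Int), a)
        = ((pvPre P Q (pvH P Q K' n l) : Int) - (pvPre P Q l : Int), (l : Int),
            ((pvH P Q K' n l : Nat) : Int),
            if r = pvH P Q K' n l then a else max a ((pvH P Q K' n l : Int) - (l : Int))) := by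
  intro fuel
  induction fuel with
  | zero => intro l r a _ _ _ hf; exact absurd hf (by omega)
  | succ fuel ih =>
    intro l r a hlr hrn hfeas hf
    by_cases hreq : r = n
    · have hH : pvH P Q K' n l = r := pvH_eq_of P Q hrn hfeas (Or.inl hreq)
      rw [hH]
      simp only [aInner1]
      rw [if_neg (by push_cast; omega)]
      simp
    · have hrn' : r < n := by omega
      simp only [aInner1]
      rw [if_pos (show ((r : Nat) : Int) < ((n : Nat) : Int) ∧
            (pvPre P Q r : Int) - (pvPre P Q l : Int) ≤ ((K' : Nat) : Int) by push_cast; omega)]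
      rw [hfoldF P Q r]
      by_cases hfr : pvF P Q r = true
      · rw [if_pos hfr]
        have hps : pvPre P Q (r + 1) = pvPre P Q r + 1 := by
          rw [pvPre_succ, if_pos hfr]
        by_cases hsat : pvPre P Q r = pvPre P Q l + K'
        · rw [if_pos (by push_cast; omega)]
          have hH : pvH P Q K' n l = r :=
            pvH_eq_of P Q hrn hfeas (Or.inr (by omega))
          rw [hH, if_pos rfl]
        · rw [if_neg (by push_cast; omega)]
          have hfeas' : pvPre P Q (r + 1) ≤ pvPre P Q l + K' := by omega
          have e1 : ((pvPre P Q r : Int) - (pvPre P Q l : Int) + 1)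
              = (pvPre P Q (r + 1) : Int) - (pvPre P Q l : Int) := by
            rw [hps]; push_cast; ring
          have e2 : ((r : Nat) : Int) + 1 = ((r + 1 : Nat) : Int) := by push_cast; ring
          rw [e1, e2, if_pos (show (pvPre P Q (r + 1) : Int) - (pvPre P Q l : Int)
                ≤ ((K' : Nat) : Int) by push_cast; omega)]
          rw [ih l (r + 1) (max a (((r + 1 : Nat) : Int) - (l : Int)))
              (by omega) (by omega) hfeas' (by omega)]
          have hrH : r + 1 ≤ pvH P Q K' n l := le_pvH P Q (by omega) hfeas'
          rw [if_neg (by omega : ¬ r = pvH P Q K' n l)]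
          by_cases hstop : r + 1 = pvH P Q K' n l
          · rw [if_pos hstop, hstop]
          · rw [if_neg hstop, max_assoc,
              max_eq_right (show ((r + 1 : Nat) : Int) - (l : Int)
                ≤ ((pvH P Q K' n l : Nat) : Int) - (l : Int) by push_cast; omega)]
      · rw [if_neg hfr]
        have hps : pvPre P Q (r + 1) = pvPre P Q r := by
          rw [pvPre_succ, if_neg hfr]; omega
        have hfeas' : pvPre P Q (r + 1) ≤ pvPre P Q l + K' := by omega
        have e1 : ((pvPre P Q r : Int)) = ((pvPre P Q (r + 1) : Int)) := by rw [hps]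
        have e2 : ((r : Nat) : Int) + 1 = ((r + 1 : Nat) : Int) := by push_cast; ring
        rw [if_pos (show (pvPre P Q r : Int) - (pvPre P Q l : Int)
              ≤ ((K' : Nat) : Int) by push_cast; omega)]
        rw [e2, e1, ih l (r + 1) (max a (((r + 1 : Nat) : Int) - (l : Int)))
            (by omega) (by omega) hfeas' (by omega)]
        have hrH : r + 1 ≤ pvH P Q K' n l := le_pvH P Q (by omega) hfeas'
        rw [if_neg (by omega : ¬ r = pvH P Q K' n l)]
        by_cases hstop : r + 1 = pvH P Q K' n l
        · rw [if_pos hstop, hstop]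
        · rw [if_neg hstop, max_assoc,
            max_eq_right (show ((r + 1 : Nat) : Int) - (l : Int)
              ≤ ((pvH P Q K' n l : Nat) : Int) - (l : Int) by push_cast; omega)]

theorem inner2_one (P Q : List Char) (K' : Nat) (fuel : Nat) (l r : Nat) (a : Int)
    (hlr : l < r) (hlt : pvPre P Q r < pvPre P Q l + K') (hfu : 1 ≤ fuel) :
    aInner2 P Q (K' : Int) fuel
        ((pvPre P Q r : Int) - (pvPre P Q l : Int), (l : Int), (r : Int), a)
      = ((pvPre P Q r : Int) - (pvPre P Q (l + 1) : Int), ((l + 1 : Nat) : Int), (r : Int), a) := by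
  obtain ⟨fuel, rfl⟩ : ∃ f, fuel = f + 1 := ⟨fuel - 1, by omega⟩
  have hml := pvPre_mono P Q (show l ≤ r by omega)
  have hml1 := pvPre_mono P Q (show l ≤ l + 1 by omega)
  have hps := pvPre_succ P Q l
  simp only [aInner2]
  rw [if_pos (show ((l : Nat) : Int) < ((r : Nat) : Int) by exact_mod_cast hlr), hfoldF P Q l]
  by_cases hfl : pvF P Q l = true
  · rw [if_pos hfl] at hps ⊢
    rw [if_pos (show (pvPre P Q r : Int) - (pvPre P Q l : Int) - 1
          < ((K' : Nat) : Int) by push_cast; omega)]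
    rw [show ((l : Nat) : Int) + 1 = ((l + 1 : Nat) : Int) by push_cast; ring,
        show (pvPre P Q r : Int) - (pvPre P Q l : Int) - 1
            = (pvPre P Q r : Int) - (pvPre P Q (l + 1) : Int) by rw [hps]; push_cast; ring]
  · rw [if_neg hfl] at hps ⊢
    rw [if_pos (show (pvPre P Q r : Int) - (pvPre P Q l : Int)
          < ((K' : Nat) : Int) by push_cast; omega)]
    rw [show ((l : Nat) : Int) + 1 = ((l + 1 : Nat) : Int) by push_cast; ring,
        show (pvPre P Q r : Int) - (pvPre P Q l : Int)
            = (pvPre P Q r : Int) - (pvPre P Q (l + 1) : Int) by rw [hps]; push_cast; ring]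

theorem inner2_shrink (P Q : List Char) (K' : Nat) :
    ∀ (fuel : Nat) (l r : Nat) (a : Int) (j : Nat), l < r →
      pvPre P Q r = pvPre P Q l + K' →
      l ≤ j → j < r → pvF P Q j = true → (∀ i, l ≤ i → i < j → pvF P Q i = false) →
      j - l < fuel →
      aInner2 P Q (K' : Int) fuel
          ((pvPre P Q r : Int) - (pvPre P Q l : Int), (l : Int), (r : Int), a)
        = ((pvPre P Q r : Int) - (pvPre P Q (j + 1) : Int), ((j + 1 : Nat) : Int), (r : Int), a) := by
  intro fuel
  induction fuel with
  | zero => intro l r a j _ _ _ _ _ _ hf; exact absurd hf (by omega)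
  | succ fuel ih =>
    intro l r a j hlr heq hjl hjr hjf hjmin hfu
    simp only [aInner2]
    rw [if_pos (show ((l : Nat) : Int) < ((r : Nat) : Int) by exact_mod_cast hlr), hfoldF P Q l]
    have hps := pvPre_succ P Q l
    by_cases hfl : pvF P Q l = true
    · have hjeq : j = l := by
        by_contra hne
        have := hjmin l (le_refl _) (by omega)
        rw [this] at hfl; exact absurd hfl (by simp)
      rw [if_pos hfl] at hps ⊢
      rw [if_pos (show (pvPre P Q r : Int) - (pvPre P Q l : Int) - 1
            < ((K' : Nat) : Int) by push_cast; omega)]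
      subst hjeq
      rw [show ((j : Nat) : Int) + 1 = ((j + 1 : Nat) : Int) by push_cast; ring,
          show (pvPre P Q r : Int) - (pvPre P Q j : Int) - 1
              = (pvPre P Q r : Int) - (pvPre P Q (j + 1) : Int) by rw [hps]; push_cast; ring]
    · have hjne : j ≠ l := fun h => hfl (h ▸ hjf)
      rw [if_neg hfl] at hps ⊢
      have hps0 : pvPre P Q (l + 1) = pvPre P Q l := by omega
      rw [if_neg (show ¬ ((pvPre P Q r : Int) - (pvPre P Q l : Int)
            < ((K' : Nat) : Int)) by push_cast; omega)]
      rw [show ((l : Nat) : Int) + 1 = ((l + 1 : Nat) : Int) by push_cast; ring,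
          show ((pvPre P Q l : Nat) : Int) = ((pvPre P Q (l + 1) : Nat) : Int) by rw [hps0]]
      exact ih (l + 1) r a j (by omega) (by omega) (by omega) hjr hjf
        (fun i h1 h2 => hjmin i (by omega) h2) (by omega)

theorem outer_eq (P Q : List Char) (K' n : Nat) (hK1 : 1 ≤ K') :
    ∀ (fuel : Nat) (l r aN : Nat), l ≤ r → r ≤ n → pvPre P Q r < pvPre P Q l + K' →
      r ≤ aN + l → n - r < fuel →
      (aOuter P Q (K' : Int) (n : Int) fuel
          ((pvPre P Q r : Int) - (pvPre P Q l : Int), (l : Int), (r : Int), (aN : Int))).2.2.2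
        = ((max aN (pvM P Q K' n l) : Nat) : Int) := by
  intro fuel
  induction fuel with
  | zero => intro l r aN _ _ _ _ hf; exact absurd hf (by omega)
  | succ fuel ih =>
    intro l r aN hlr hrn hflt haN hfu
    by_cases hreq : r = n
    · simp only [aOuter]
      rw [if_neg (by push_cast; omega)]
      have hMl : pvM P Q K' n l ≤ aN := by
        refine Finset.sup_le (fun x hx => ?_)
        rw [Finset.mem_Icc] at hx
        have := pvH_le P Q K' n x
        omega
      rw [max_eq_left hMl]
    · have hrn' : r < n := by omega
      simp only [aOuter]
      rw [if_pos (show ((r : Nat) : Int) < ((n : Nat) : Int) by push_cast; omega)]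
      simp only [Int.toNat_natCast]
      rw [inner1_eq P Q K' n (n + 1) l r (aN : Int) hlr hrn (by omega) (by omega)]
      have hfeas1 : pvPre P Q (r + 1) ≤ pvPre P Q l + K' := by
        have := pvPre_succ P Q r; split at this <;> omega
      have hrH : r < pvH P Q K' n l := by
        have := le_pvH P Q (show r + 1 ≤ n by omega) hfeas1; omega
      have hHle := pvH_le P Q K' n l
      have hHfeas := pvH_spec P Q K' n l
      rw [if_neg (by omega : ¬ r = pvH P Q K' n l)]
      rw [show max (aN : Int) (((pvH P Q K' n l : Nat) : Int) - ((l : Nat) : Int))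
            = ((max aN (pvH P Q K' n l - l) : Nat) : Int) by
          rw [Nat.cast_max, Nat.cast_sub (by omega)]]
      by_cases hhn : pvH P Q K' n l = n
      · -- the window already reaches the end of the string
        have hfeasn : pvPre P Q n ≤ pvPre P Q l + K' := hhn ▸ hHfeas
        have hHx : ∀ x, l ≤ x → x ≤ n → pvH P Q K' n x = n := by
          intro x hx1 hx2
          refine le_antisymm (pvH_le _ _ _ _ _) (le_pvH P Q (le_refl _) ?_)
          have := pvPre_mono P Q hx1; omega
        have hMl : pvM P Q K' n l = n - l := by
          refine le_antisymm (Finset.sup_le fun x hx => ?_) ?_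
          · rw [Finset.mem_Icc] at hx
            rw [hHx x hx.1 hx.2]
            omega
          · refine le_trans ?_ (Finset.le_sup (Finset.mem_Icc.mpr ⟨le_refl l, by omega⟩))
            show n - l ≤ pvH P Q K' n l - l
            rw [hHx l (le_refl l) (by omega)]
        have hMup : ∀ l', l ≤ l' → pvM P Q K' n l' ≤ n - l := by
          intro l' hl'
          refine Finset.sup_le fun x hx => ?_
          rw [Finset.mem_Icc] at hx
          have := pvH_le P Q K' n x
          omega
        rw [hhn, hMl]
        by_cases hcnt : pvPre P Q n < pvPre P Q l + K'
        · rw [inner2_one P Q K' (n + 1) l n ((max aN (n - l) : Nat) : Int)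
              (by omega) hcnt (by omega)]
          rw [ih (l + 1) n (max aN (n - l)) (by omega) (le_refl n)
              (by have := pvPre_mono P Q (show l ≤ l + 1 by omega); omega)
              (by have := le_max_right aN (n - l); omega) (by omega)]
          rw [max_assoc, max_eq_left (hMup (l + 1) (by omega))]
        · have hceq : pvPre P Q n = pvPre P Q l + K' := by omega
          obtain ⟨j, hjl, hjr, hjf, hjmin⟩ :=
            exists_first_normal P Q (show pvPre P Q l < pvPre P Q n by omega)
          rw [inner2_shrink P Q K' (n + 1) l n ((max aN (n - l) : Nat) : Int) j
              (by omega) hceq hjl hjr hjf hjmin (by omega)]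
          have hpj : pvPre P Q j = pvPre P Q l := pvPre_congr P Q hjl hjmin
          have hpj1 : pvPre P Q (j + 1) = pvPre P Q l + 1 := by
            rw [pvPre_succ, if_pos hjf, hpj]
          rw [ih (j + 1) n (max aN (n - l)) (by omega) (le_refl n) (by omega)
              (by have := le_max_right aN (n - l); omega) (by omega)]
          rw [max_assoc, max_eq_left (hMup (j + 1) (by omega))]
      · -- the window is cut short by a (K'+1)-st normal character
        have hhn' : pvH P Q K' n l < n := by omega
        have hfull : pvPre P Q (pvH P Q K' n l) = pvPre P Q l + K' := pvH_lt_full P Q hhn'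
        obtain ⟨j, hjl, hjr, hjf, hjmin⟩ :=
          exists_first_normal P Q (show pvPre P Q l < pvPre P Q (pvH P Q K' n l) by omega)
        rw [inner2_shrink P Q K' (n + 1) l (pvH P Q K' n l)
            ((max aN (pvH P Q K' n l - l) : Nat) : Int) j (by omega) hfull hjl hjr hjf hjmin
            (by omega)]
        have hpj : pvPre P Q j = pvPre P Q l := pvPre_congr P Q hjl hjmin
        have hpj1 : pvPre P Q (j + 1) = pvPre P Q l + 1 := by
          rw [pvPre_succ, if_pos hjf, hpj]
        rw [ih (j + 1) (pvH P Q K' n l) (max aN (pvH P Q K' n l - l)) (by omega) (by omega)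
            (by omega) (by have := le_max_right aN (pvH P Q K' n l - l); omega) (by omega)]
        have hsup1 : (Finset.Icc l j).sup (fun x => pvH P Q K' n x - x)
            = pvH P Q K' n l - l := by
          refine le_antisymm (Finset.sup_le fun x hx => ?_) ?_
          · rw [Finset.mem_Icc] at hx
            have hpx : pvPre P Q x = pvPre P Q l :=
              pvPre_congr P Q hx.1 (fun i h1 h2 => hjmin i h1 (by omega))
            rw [pvH_congr P Q hpx]
            omega
          · exact Finset.le_sup (f := fun x => pvH P Q K' n x - x)
              (Finset.mem_Icc.mpr ⟨le_refl l, hjl⟩)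
        have hIcc : Finset.Icc l n = Finset.Icc l j ∪ Finset.Icc (j + 1) n := by
          ext x; simp only [Finset.mem_Icc, Finset.mem_union]; omega
        have hMsplit : pvM P Q K' n l = max (pvH P Q K' n l - l) (pvM P Q K' n (j + 1)) := by
          simp only [pvM]
          rw [hIcc, Finset.sup_union, hsup1]
        rw [hMsplit, max_assoc]

-- ===== VERDICT (by name: the statement is the Claim_ definition above) =====
theorem maxNormalSubstring_spec : Claim_equal_maxNormalSubstring := by
  intro P Q K N hDom hPre
  unfold Spec_maxNormalSubstring
  simp only [maxNormalSubstring, maxNormalSubstring_alt]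
  by_cases hK0 : K = 0
  · simp [hK0]
  · rw [if_neg (by simpa using hK0), if_neg (by simpa using hK0)]
    by_cases hN0 : N ≤ 0
    · rw [show N.toNat + 1 = 0 + 1 by rw [Int.toNat_of_nonpos hN0]]
      rw [show aOuter P.toList Q.toList K N (0 + 1) (0, 0, 0, 0) = (0, 0, 0, 0) by
        simp only [aOuter]; rw [if_neg (by omega : ¬ ((0 : Int) < N))]]
      rw [PySem.List.pyRange_one_eq_nil (by omega)]
      rfl
    · have hPre3 : 1 ≤ K ∧ N ≤ (P.toList.length : Int) := by
        rcases hPre with h | h | h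
        · exact absurd h hK0
        · exact absurd h hN0
        · exact ⟨h.1, h.2.1⟩
      obtain ⟨n, rfl⟩ : ∃ m : Nat, N = (m : Int) :=
        ⟨N.toNat, (Int.toNat_of_nonneg (by omega)).symm⟩
      obtain ⟨K', rfl⟩ : ∃ m : Nat, K = (m : Int) :=
        ⟨K.toNat, (Int.toNat_of_nonneg (by omega)).symm⟩
      have hK1 : 1 ≤ K' := by exact_mod_cast hPre3.1
      simp only [Int.toNat_natCast]
      rw [show ((0 : Int), (0 : Int), (0 : Int), (0 : Int))
            = ((pvPre P.toList Q.toList 0 : Int) - (pvPre P.toList Q.toList 0 : Int),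
                ((0 : Nat) : Int), ((0 : Nat) : Int), ((0 : Nat) : Int)) by
          simp]
      rw [outer_eq P.toList Q.toList K' n hK1 (n + 1) 0 0 0 (le_refl _) (Nat.zero_le _)
          (by omega) (by omega) (by omega)]
      rw [bFold P.toList Q.toList (bPre (bNormal P.toList Q.toList (n : Int)))
          ((K' : Nat) : Int) K' n (n + 2) rfl (le_refl _)
          (bPre_get P.toList Q.toList (n : Int) n rfl) n (le_refl _)]
      rw [pvV_eq_pvM]
      rw [max_eq_right (Nat.zero_le _)]
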